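-- pv_equiv track=rewrite | github.com/686f6c61/scraper_dominios_registrados | posibles.py | encontrar_dominios_coincidentes
-- ===== SOURCE A (Python) =====
-- def encontrar_dominios_coincidentes(dominios, alertas):
--     """
--     Encuentra los dominios que contienen alguna de las palabras clave de las alertas.
--     """
--     coincidencias = []
--     for fecha, dominio in dominios:
--         for alerta in alertas:
--             if alerta.lower() in dominio.lower():
--                 coincidencias.append((fecha, dominio, alerta))
--                 break  # Solo añadir una vez cada dominio
--     return coincidencias
-- ===== SOURCE B (Python) =====
-- def encontrar_dominios_coincidentes(dominios, alertas):
--     """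
--     Encuentra los dominios que contienen alguna de las palabras clave de las alertas.
--     Recorre las ALERTAS en el bucle exterior sobre una lista de trabajo de dominios
--     aun sin alerta (el primer acierto gana por construccion) y reordena al final.
--     """
--     restantes = list(enumerate(dominios))   # dominios aun sin alerta asignada
--     elegidos = []                           # (indice, (fecha, dominio, alerta))
--     for alerta in alertas:
--         al = alerta.lower()
--         todavia = []
--         for i, (fecha, dominio) in restantes:
--             if al in dominio.lower():
--                 elegidos.append((i, (fecha, dominio, alerta)))
--             else:
--                 todavia.append((i, (fecha, dominio)))
--         restantes = todavia
--     elegidos.sort(key=lambda par: par[0])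
--     return [t for _, t in elegidos]
-- ===== Notes on version B (the rewrite author's own statement) =====
-- stated objective: alternative
-- what changed: B inverts the loop nesting: it iterates alerts in the outer loop over a shrinking worklist of still-unmatched enumerated domains (so the first alert in list order wins by construction, and each alert is lowercased once), collects (index, result) pairs, and sorts them by index at the end to restore domain order, instead of A's per-domain inner scan with break.
import Mathlib
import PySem

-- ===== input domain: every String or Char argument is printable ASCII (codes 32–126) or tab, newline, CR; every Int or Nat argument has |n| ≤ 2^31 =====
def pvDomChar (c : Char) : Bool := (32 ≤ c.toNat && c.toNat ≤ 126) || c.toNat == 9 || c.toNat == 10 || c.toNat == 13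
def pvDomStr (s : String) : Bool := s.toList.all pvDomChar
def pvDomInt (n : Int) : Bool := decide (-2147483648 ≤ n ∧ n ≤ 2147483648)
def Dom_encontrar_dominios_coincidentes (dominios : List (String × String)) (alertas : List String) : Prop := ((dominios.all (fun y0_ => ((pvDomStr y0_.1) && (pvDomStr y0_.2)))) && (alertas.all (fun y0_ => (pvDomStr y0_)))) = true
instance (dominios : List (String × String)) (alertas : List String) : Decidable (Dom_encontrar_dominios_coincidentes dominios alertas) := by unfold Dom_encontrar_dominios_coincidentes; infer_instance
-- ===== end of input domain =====

-- B inverts the loop nesting: outer loop over alerts on a shrinking worklist of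
-- still-unmatched enumerated domains, then a final sort by index restores domain order (alternative).

-- ===== PORT A =====
-- inner 'for alerta in alertas: … break' loop of A, carried over the accumulator
def pvInnerA (fecha dominio : String) : List String → List (String × String × String) → List (String × String × String)
  | [], acc => acc
  | alerta :: rest, acc =>
      if PySem.Str.isIn (PySem.Str.lower alerta) (PySem.Str.lower dominio) then
        acc ++ [(fecha, dominio, alerta)]          -- append then break
      else
        pvInnerA fecha dominio rest acc

def encontrar_dominios_coincidentes (dominios : List (String × String)) (alertas : List String) : List (String × String × String) :=
  dominios.foldl (fun acc fd => pvInnerA fd.1 fd.2 alertas acc) []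

-- ===== PORT B =====
-- one pass of Source B's outer loop: split 'restantes' into matches (appended to 'elegidos') and 'todavia'
def pvPassB (alerta : String)
    (st : List (Int × (String × String × String)) × List (Int × (String × String))) :
    List (Int × (String × String × String)) × List (Int × (String × String)) :=
  let al := PySem.Str.lower alerta
  st.2.foldl (fun s p =>
      if PySem.Str.isIn al (PySem.Str.lower p.2.2) then
        (s.1 ++ [(p.1, (p.2.1, p.2.2, alerta))], s.2)
      else
        (s.1, s.2 ++ [p]))
    (st.1, [])

def encontrar_dominios_coincidentes_alt (dominios : List (String × String)) (alertas : List String) : List (String × String × String) :=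
  (PySem.List.sorted (alertas.foldl (fun st alerta => pvPassB alerta st) ([], PySem.List.enumerate dominios)).1
      (fun par => par.1) false).map (fun par => par.2)

-- ===== PRECONDITION & SPEC =====
def Spec_encontrar_dominios_coincidentes (dominios : List (String × String)) (alertas : List String) (out : List (String × String × String)) : Prop := out = encontrar_dominios_coincidentes_alt dominios alertas
instance (dominios : List (String × String)) (alertas : List String) (out : List (String × String × String)) : Decidable (Spec_encontrar_dominios_coincidentes dominios alertas out) := by unfold Spec_encontrar_dominios_coincidentes; infer_instance

-- ===== CLAIM (what is proved, stated in full; the proofs are below) =====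
def Claim_equal_encontrar_dominios_coincidentes : Prop := ∀ (dominios : List (String × String)) (alertas : List String), Dom_encontrar_dominios_coincidentes dominios alertas → Spec_encontrar_dominios_coincidentes dominios alertas (encontrar_dominios_coincidentes dominios alertas)

-- ===== LEMMAS AND PROOFS =====
-- first alert (in list order) matching the domain: the common specification of both programs
def pvFM (alertas : List String) (dominio : String) : Option String :=
  alertas.find? (fun a => PySem.Str.isIn (PySem.Str.lower a) (PySem.Str.lower dominio))

-- shorthand for the per-domain contribution, tagged with its index
def pvG (alertas : List String) (p : Int × (String × String)) : Option (Int × (String × String × String)) :=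
  (pvFM alertas p.2.2).map (fun a => (p.1, (p.2.1, p.2.2, a)))

-- A's inner loop appends exactly the first-match contribution
theorem pvInnerA_eq (fecha dominio : String) (alertas : List String) (acc : List (String × String × String)) :
    pvInnerA fecha dominio alertas acc =
      acc ++ ((pvFM alertas dominio).map (fun a => (fecha, dominio, a))).toList := by
  induction alertas generalizing acc with
  | nil => simp [pvInnerA, pvFM]
  | cons a rest ih =>
      by_cases h : PySem.Chars.isIn (PySem.Chars.lower a.toList) (PySem.Chars.lower dominio.toList) = true
      · simp [pvInnerA, pvFM, h]
      · simp only [Bool.not_eq_true] at h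
        simp [pvInnerA, pvFM, h, ih acc]

-- A in first-match form
theorem pvA_eq (dominios : List (String × String)) (alertas : List String) :
    encontrar_dominios_coincidentes dominios alertas =
      dominios.filterMap (fun fd => (pvFM alertas fd.2).map (fun a => (fd.1, fd.2, a))) := by
  suffices h : ∀ acc, dominios.foldl (fun acc fd => pvInnerA fd.1 fd.2 alertas acc) acc =
      acc ++ dominios.filterMap (fun fd => (pvFM alertas fd.2).map (fun a => (fd.1, fd.2, a))) by
    simpa [encontrar_dominios_coincidentes] using h []
  induction dominios with
  | nil => simp
  | cons fd rest ih =>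
      intro acc
      rw [List.foldl_cons, pvInnerA_eq, ih, List.filterMap_cons]
      cases h : pvFM alertas fd.2 <;> simp

-- one pass of B, in split form
theorem pvPassB_eq (alerta : String) (eleg : List (Int × (String × String × String)))
    (rest : List (Int × (String × String))) :
    pvPassB alerta (eleg, rest) =
      (eleg ++ (rest.filter (fun p => PySem.Str.isIn (PySem.Str.lower alerta) (PySem.Str.lower p.2.2))).map
          (fun p => (p.1, (p.2.1, p.2.2, alerta))),
       rest.filter (fun p => !PySem.Str.isIn (PySem.Str.lower alerta) (PySem.Str.lower p.2.2))) := by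
  suffices h : ∀ e t, rest.foldl (fun s p =>
      if PySem.Str.isIn (PySem.Str.lower alerta) (PySem.Str.lower p.2.2) then
        (s.1 ++ [(p.1, (p.2.1, p.2.2, alerta))], s.2)
      else (s.1, s.2 ++ [p])) (e, t) =
      (e ++ (rest.filter (fun p => PySem.Str.isIn (PySem.Str.lower alerta) (PySem.Str.lower p.2.2))).map
          (fun p => (p.1, (p.2.1, p.2.2, alerta))),
       t ++ rest.filter (fun p => !PySem.Str.isIn (PySem.Str.lower alerta) (PySem.Str.lower p.2.2))) by
    simpa [pvPassB] using h eleg []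
  induction rest with
  | nil => intro e t; simp
  | cons p r ih =>
      intro e t
      rw [List.foldl_cons]
      by_cases h : PySem.Str.isIn (PySem.Str.lower alerta) (PySem.Str.lower p.2.2) = true
      · simp only [if_pos h]
        rw [ih]
        have h' : PySem.Chars.isIn (PySem.Chars.lower alerta.toList) (PySem.Chars.lower p.2.2.toList) = true := by
          simpa using h
        simp [h']
      · simp only [if_neg h]
        rw [ih]
        have h' : PySem.Chars.isIn (PySem.Chars.lower alerta.toList) (PySem.Chars.lower p.2.2.toList) = false := by
          simpa using h
        simp [h']

-- splitting one alert off the first-match contribution, up to permutation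
theorem pvSplit_perm (a : String) (as : List String) (rest : List (Int × (String × String))) :
    ((rest.filter (fun p => PySem.Str.isIn (PySem.Str.lower a) (PySem.Str.lower p.2.2))).map
        (fun p => (p.1, (p.2.1, p.2.2, a))) ++
      (rest.filter (fun p => !PySem.Str.isIn (PySem.Str.lower a) (PySem.Str.lower p.2.2))).filterMap (pvG as)).Perm
      (rest.filterMap (pvG (a :: as))) := by
  induction rest with
  | nil => simp
  | cons p r ih =>
      by_cases h : PySem.Chars.isIn (PySem.Chars.lower a.toList) (PySem.Chars.lower p.2.2.toList) = true
      · have hg : pvG (a :: as) p = some (p.1, (p.2.1, p.2.2, a)) := by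
          simp [pvG, pvFM, h]
        simp only [List.filterMap_cons, hg]
        have hf : (List.filter (fun p => PySem.Str.isIn (PySem.Str.lower a) (PySem.Str.lower p.2.2)) (p :: r)) =
            p :: List.filter (fun p => PySem.Str.isIn (PySem.Str.lower a) (PySem.Str.lower p.2.2)) r := by
          simp [h]
        have hf2 : (List.filter (fun p => !PySem.Str.isIn (PySem.Str.lower a) (PySem.Str.lower p.2.2)) (p :: r)) =
            List.filter (fun p => !PySem.Str.isIn (PySem.Str.lower a) (PySem.Str.lower p.2.2)) r := by
          simp [h]
        rw [hf, hf2, List.map_cons, List.cons_append]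
        exact ih.cons _
      · simp only [Bool.not_eq_true] at h
        have hg : pvG (a :: as) p = pvG as p := by
          simp [pvG, pvFM, h]
        have hf : (List.filter (fun p => PySem.Str.isIn (PySem.Str.lower a) (PySem.Str.lower p.2.2)) (p :: r)) =
            List.filter (fun p => PySem.Str.isIn (PySem.Str.lower a) (PySem.Str.lower p.2.2)) r := by
          simp [h]
        have hf2 : (List.filter (fun p => !PySem.Str.isIn (PySem.Str.lower a) (PySem.Str.lower p.2.2)) (p :: r)) =
            p :: List.filter (fun p => !PySem.Str.isIn (PySem.Str.lower a) (PySem.Str.lower p.2.2)) r := by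
          simp [h]
        rw [hf, hf2, List.filterMap_cons, List.filterMap_cons, hg]
        cases hx : pvG as p with
        | none => simpa using ih
        | some x => exact (List.perm_middle).trans (ih.cons x)

-- the outer fold over alerts accumulates, up to permutation, the first-match contributions
theorem pvFoldB_perm (alertas : List String) (eleg : List (Int × (String × String × String)))
    (rest : List (Int × (String × String))) :
    ((alertas.foldl (fun st alerta => pvPassB alerta st) (eleg, rest)).1).Perm
      (eleg ++ rest.filterMap (pvG alertas)) := by
  induction alertas generalizing eleg rest with
  | nil => simp [pvG, pvFM]
  | cons a as ih =>
      rw [List.foldl_cons, pvPassB_eq]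
      refine (ih _ _).trans ?_
      rw [List.append_assoc]
      exact (pvSplit_perm a as rest).append_left eleg

-- the contributions of the enumerated domain list are strictly increasing in their index
theorem pvL_pairwise (dominios : List (String × String)) (alertas : List String) :
    ((PySem.List.enumerate dominios).filterMap (pvG alertas)).Pairwise (fun x y => x.1 < y.1) := by
  have hp := PySem.List.pairwise_lt_enumerate (xs := dominios) (s := 0)
  refine List.Pairwise.filterMap (pvG alertas) ?_ hp
  intro p q hpq x hx y hy
  have hx1 : x.1 = p.1 := by
    cases hfm : pvFM alertas p.2.2 <;> simp [pvG, hfm] at hx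
    · rw [← hx]
  have hy1 : y.1 = q.1 := by
    cases hfm : pvFM alertas q.2.2 <;> simp [pvG, hfm] at hy
    · rw [← hy]
  rw [hx1, hy1]; exact hpq

-- dropping the indices recovers A's first-match form
theorem pvL_map_snd (dominios : List (String × String)) (alertas : List String) (s : Int) :
    ((PySem.List.enumerate dominios s).filterMap (pvG alertas)).map (fun par => par.2) =
      dominios.filterMap (fun fd => (pvFM alertas fd.2).map (fun a => (fd.1, fd.2, a))) := by
  induction dominios generalizing s with
  | nil => simp [PySem.List.enumerate_nil]
  | cons fd rest ih =>
      rw [PySem.List.enumerate_cons, List.filterMap_cons, List.filterMap_cons]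
      have hg : pvG alertas (s, fd) = (pvFM alertas fd.2).map (fun a => (s, (fd.1, fd.2, a))) := rfl
      cases h : pvFM alertas fd.2 <;> simp [hg, h, ih (s + 1)]

-- ===== VERDICT (by name: the statement is the Claim_ definition above) =====
theorem encontrar_dominios_coincidentes_spec : Claim_equal_encontrar_dominios_coincidentes := by
  intro dominios alertas _
  unfold Spec_encontrar_dominios_coincidentes encontrar_dominios_coincidentes_alt
  have hperm : (((PySem.List.enumerate dominios).filterMap (pvG alertas))).Perm
      ((alertas.foldl (fun st alerta => pvPassB alerta st) ([], PySem.List.enumerate dominios)).1) :=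
    ((pvFoldB_perm alertas [] (PySem.List.enumerate dominios)).trans (by simp)).symm
  rw [PySem.List.sorted_eq_of_perm_of_pairwise_lt _ _ (fun par => par.1) hperm
      (pvL_pairwise dominios alertas),
    pvL_map_snd, pvA_eq]
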